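-- pv_equiv track=rewrite | github.com/robvilarino/Codewars-Solutions | 80s_kids_4-legends_of_the_hidden_temple.py | mark_spot
-- ===== SOURCE A (Python) =====
-- def mark_spot(n):
--
--     if not isinstance(n, int) or n%2==0 or n<1: return "?"
--     if n == 1: return "X\n"
--
--     r = [] # Will return a joined list of strings
--     center_width = 3+((n-3)*2) # Spaces between X for each line
--     start_width = 0 # Spaces preceeding the first X on any given line, 0 at first
--
--     # Will make the first half of the X and the middle sing X
--     for x in range(n, ((n+1)//2)-1, -1):
--
--         # This is the middle of the big X
--         if x == ((n+1)//2):
--             r.append(" "*start_width+"X\n") # Will always be a single X with set number of spaces before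
--         else:
--             r.append(" "*start_width +"X" + " "*center_width +"X\n")
--             center_width -=4
--             start_width +=2
--
--     # Go backward from the middle of the array to complete the symmetrical X
--     for y in range(((n+1)//2)-2, -1, -1):
--         r.append(r[y])
--
--     # Return list as one string joined
--     return "".join(r)
-- ===== SOURCE B (Python) =====
-- def mark_spot(n):
--     if not isinstance(n, int) or n % 2 == 0 or n < 1:
--         return "?"
--     rows = []
--     for i in range(n):
--         left = 2 * min(i, n - 1 - i)
--         right = 2 * n - 2 - left
--         if left == right:
--             rows.append(" " * left + "X\n")
--         else:
--             rows.append(" " * left + "X" + " " * (right - left - 1) + "X\n")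
--     return "".join(rows)
-- ===== Notes on version B (the rewrite author's own statement) =====
-- stated objective: simpler
-- what changed: B computes each of the n rows directly from its row index (left X column = 2*min(i, n-1-i)) in one uniform pass, replacing A's build-top-half-with-width-accumulators-then-mirror-by-self-indexing construction and needing no special case for the single-row board.
import Mathlib
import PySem

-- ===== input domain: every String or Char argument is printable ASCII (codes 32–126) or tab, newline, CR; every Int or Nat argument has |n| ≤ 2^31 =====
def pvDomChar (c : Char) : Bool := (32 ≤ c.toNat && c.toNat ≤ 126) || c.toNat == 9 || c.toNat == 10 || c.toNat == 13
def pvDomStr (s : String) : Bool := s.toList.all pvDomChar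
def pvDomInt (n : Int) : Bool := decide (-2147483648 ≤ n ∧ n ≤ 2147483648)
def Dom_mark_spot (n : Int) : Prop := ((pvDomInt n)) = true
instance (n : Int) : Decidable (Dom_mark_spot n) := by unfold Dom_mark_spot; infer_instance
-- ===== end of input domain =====

-- B renders each row of the X directly from its row index (left = 2*min(i, n-1-i)),
-- dropping A's build-half-then-mirror construction: simpler, one uniform pass, no special-cased smallest board.

-- rows are built as List Char (Python builds strings); joined and packed into a String at the end
def pvSp (k : Int) : List Char := List.replicate k.toNat ' '   -- " " * k (empty for k ≤ 0, as in Python)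

-- ===== PORT A =====
-- one iteration of A's first loop; state = (r, center_width, start_width)
def pvStepA (mid : Int) (st : List (List Char) × Int × Int) (x : Int) :
    List (List Char) × Int × Int :=
  if x = mid then (st.1 ++ [pvSp st.2.2 ++ ['X', '\n']], st.2.1, st.2.2)
  else (st.1 ++ [pvSp st.2.2 ++ ['X'] ++ pvSp st.2.1 ++ ['X', '\n']], st.2.1 - 4, st.2.2 + 2)

-- one iteration of A's mirror loop: r.append(r[y]); r[y] via pyGet? — never none on A's runs (0 ≤ y < len r)
def pvStepM (r : List (List Char)) (y : Int) : List (List Char) :=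
  r ++ [(PySem.List.pyGet? r y).getD []]

def mark_spot (n : Int) : String :=
  if PySem.Int.mod n 2 = 0 ∨ n < 1 then "?"
  else if n = 1 then "X\n"
  else
    let mid : Int := PySem.Int.floordiv (n + 1) 2
    let st := (PySem.List.pyRange n (mid - 1) (-1)).foldl (pvStepA mid)
                ([], 3 + (n - 3) * 2, 0)
    let r := (PySem.List.pyRange (mid - 2) (-1) (-1)).foldl pvStepM st.1
    String.ofList (PySem.Chars.join [] r)

-- ===== PORT B =====
def pvRowB (n i : Int) : List Char :=
  let left := 2 * min i (n - 1 - i)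
  let right := 2 * n - 2 - left
  if left = right then pvSp left ++ ['X', '\n']
  else pvSp left ++ ['X'] ++ pvSp (right - left - 1) ++ ['X', '\n']

def mark_spot_alt (n : Int) : String :=
  if PySem.Int.mod n 2 = 0 ∨ n < 1 then "?"
  else String.ofList (PySem.Chars.join [] ((PySem.List.pyRange 0 n 1).map (pvRowB n)))

-- ===== PRECONDITION & SPEC =====
def Spec_mark_spot (n : Int) (out : String) : Prop := out = mark_spot_alt n
instance (n : Int) (out : String) : Decidable (Spec_mark_spot n out) := by unfold Spec_mark_spot; infer_instance

-- ===== CLAIM (what is proved, stated in full; the proofs are below) =====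
def Claim_equal_mark_spot : Prop := ∀ (n : Int), Dom_mark_spot n → Spec_mark_spot n (mark_spot n)

-- ===== LEMMAS AND PROOFS =====

lemma pvSp_congr {a b : Int} (h : a = b) : pvSp a = pvSp b := by rw [h]

-- pyRange with step -1 is a map over List.range
lemma pvRange_neg_one (a b : Int) (h : b < a) :
    PySem.List.pyRange a b (-1) = (List.range (a - b).toNat).map (fun k : Nat => a - (k : Int)) := by
  simp only [PySem.List.pyRange, if_neg (by norm_num : ¬ ((-1 : Int) = 0)),
    if_neg (by norm_num : ¬ ((0:Int) < -1)), if_pos h]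
  have h1 : (a - b + -(-1) - 1) / -(-1) = a - b := by norm_num
  rw [h1]
  refine List.map_congr_left ?_
  intro k _; ring

-- A's first loop on a stretch that never hits the middle row
lemma pvLoop1a (mid a : Int) (c : Nat)
    (h : ∀ k : Nat, k < c → a - (k : Int) ≠ mid) :
    ∀ (cw sw : Int) (r0 : List (List Char)),
    ((List.range c).map (fun k : Nat => a - (k : Int))).foldl (pvStepA mid) (r0, cw, sw)
    = (r0 ++ (List.range c).map
        (fun j : Nat => pvSp (sw + 2*(j:Int)) ++ ['X'] ++ pvSp (cw - 4*(j:Int)) ++ ['X','\n']),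
       cw - 4*(c:Int), sw + 2*(c:Int)) := by
  induction c with
  | zero => intro cw sw r0; simp
  | succ c ih =>
    intro cw sw r0
    rw [List.range_succ, List.map_append, List.foldl_append,
      ih (fun k hk => h k (Nat.lt_succ_of_lt hk)) cw sw r0]
    simp only [List.map_cons, List.map_nil, List.foldl_cons, List.foldl_nil]
    rw [pvStepA, if_neg (h c (Nat.lt_succ_self c))]
    simp only [List.map_append, List.map_cons, List.map_nil,
      List.append_assoc, List.singleton_append, Prod.mk.injEq]
    refine ⟨by simp, by push_cast; ring, by push_cast; ring⟩

-- A's mirror loop reads only inside the fixed prefix r1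
lemma pvLoop2a (b : Int) (r1 : List (List Char)) (c : Nat)
    (h : ∀ k : Nat, k < c → 0 ≤ b - (k : Int) ∧ (b - (k : Int)).toNat < r1.length) :
    ∀ acc : List (List Char), r1 <+: acc →
    ((List.range c).map (fun k : Nat => b - (k : Int))).foldl pvStepM acc
    = acc ++ (List.range c).map (fun k : Nat => r1.getD (b - (k : Int)).toNat []) := by
  induction c with
  | zero => intro acc _; simp
  | succ c ih =>
    intro acc hpre
    rw [List.range_succ, List.map_append, List.foldl_append,
      ih (fun k hk => h k (Nat.lt_succ_of_lt hk)) acc hpre]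
    simp only [List.map_cons, List.map_nil, List.foldl_cons, List.foldl_nil]
    obtain ⟨hnn, hlt⟩ := h c (Nat.lt_succ_self c)
    have hpre' : r1 <+: acc ++ (List.range c).map (fun k : Nat => r1.getD (b - (k : Int)).toNat []) :=
      hpre.trans (List.prefix_append _ _)
    rw [pvStepM]
    have hget : PySem.List.pyGet? (acc ++ (List.range c).map
        (fun k : Nat => r1.getD (b - (k : Int)).toNat [])) (b - (c : Int))
        = some (r1.getD (b - (c : Int)).toNat []) := by
      obtain ⟨t, ht⟩ := hpre'
      have hx : (b - (c : Int)) = (((b - (c : Int)).toNat : Nat) : Int) := by omega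
      rw [hx, PySem.List.pyGet?_natCast, ← ht, List.getElem?_append_left hlt,
        List.getElem?_eq_getElem hlt, Int.toNat_natCast, List.getD_eq_getElem _ _ hlt]
    rw [hget]
    simp

-- the rows A's first loop produces, for n = 2*m+1
def pvRowsTop (m : Nat) : List (List Char) :=
  (List.range m).map
    (fun j : Nat => pvSp (2*(j:Int)) ++ ['X'] ++ pvSp (4*(m:Int) - 1 - 4*(j:Int)) ++ ['X','\n'])
  ++ [pvSp (2*(m:Int)) ++ ['X','\n']]

lemma pvRowsTop_length (m : Nat) : (pvRowsTop m).length = m + 1 := by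
  simp [pvRowsTop]

lemma pvRowsTop_getD (m j : Nat) (hj : j < m) :
    (pvRowsTop m).getD j []
    = pvSp (2*(j:Int)) ++ ['X'] ++ pvSp (4*(m:Int) - 1 - 4*(j:Int)) ++ ['X','\n'] := by
  rw [pvRowsTop, List.getD_eq_getElem _ _ (by simp; omega),
    List.getElem_append_left (by simpa using hj)]
  simp

-- B's row for i ≤ m (top half incl. middle)
lemma pvRowB_top (m i : Nat) (hi : i ≤ m) :
    pvRowB ((2*m+1 : Nat) : Int) (i : Nat)
    = (if i = m then pvSp (2*(i:Int)) ++ ['X','\n']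
       else pvSp (2*(i:Int)) ++ ['X'] ++ pvSp (4*(m:Int) - 1 - 4*(i:Int)) ++ ['X','\n']) := by
  rw [pvRowB]
  have hmin : min ((i:Nat):Int) (((2*m+1 : Nat):Int) - 1 - ((i:Nat):Int)) = (i:Int) := by
    push_cast; omega
  simp only [hmin]
  by_cases h : i = m
  · rw [if_pos (by push_cast; omega), if_pos h, h]
  · rw [if_neg (by push_cast; omega), if_neg h]
    congr 2
    apply pvSp_congr; push_cast; omega

-- B's row for i = m+1+k (bottom half)
lemma pvRowB_bot (m k : Nat) (hk : k < m) :
    pvRowB ((2*m+1 : Nat) : Int) ((m+1+k : Nat) : Int)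
    = pvSp (2*((m-1-k : Nat):Int)) ++ ['X'] ++ pvSp (4*(m:Int) - 1 - 4*((m-1-k : Nat):Int)) ++ ['X','\n'] := by
  rw [pvRowB]
  have hmin : min (((m+1+k : Nat):Int)) (((2*m+1 : Nat):Int) - 1 - ((m+1+k : Nat):Int))
      = ((m-1-k : Nat):Int) := by push_cast; omega
  simp only [hmin]
  rw [if_neg (by push_cast; omega)]
  congr 2
  apply pvSp_congr; push_cast; omega

-- ===== VERDICT (by name: the statement is the Claim_ definition above) =====
set_option maxRecDepth 8192 in
theorem mark_spot_spec : Claim_equal_mark_spot := by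
  intro n _
  unfold Spec_mark_spot mark_spot mark_spot_alt
  by_cases hguard : PySem.Int.mod n 2 = 0 ∨ n < 1
  · rw [if_pos hguard, if_pos hguard]
  · rw [if_neg hguard, if_neg hguard]
    obtain ⟨hmod, hpos⟩ := not_or.mp hguard
    have hodd : ¬ (2 ∣ n) := fun hd => hmod ((PySem.Int.mod_eq_zero_iff_dvd n 2).2 hd)
    obtain ⟨m, hm⟩ : ∃ m : Nat, n = ((2*m+1 : Nat) : Int) := ⟨((n-1)/2).toNat, by push_cast; omega⟩
    subst hm
    have hmid : PySem.Int.floordiv (((2*m+1 : Nat) : Int) + 1) 2 = (m:Int) + 1 := by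
      rw [PySem.Int.floordiv_eq_ediv_of_pos (by norm_num)]; push_cast; omega
    by_cases h1 : ((2*m+1 : Nat) : Int) = 1
    · have hm0 : m = 0 := by omega
      subst hm0
      rw [if_pos h1]
      set_option maxRecDepth 8192 in decide
    · rw [if_neg h1]
      have hm1 : 1 ≤ m := by omega
      simp only [hmid]
      -- A's first loop
      have hr1 : PySem.List.pyRange ((2*m+1 : Nat) : Int) ((m:Int) + 1 - 1) (-1)
          = (List.range (m+1)).map (fun k : Nat => ((2*m+1 : Nat) : Int) - (k : Int)) := by
        rw [pvRange_neg_one _ _ (by push_cast; omega)]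
        have h2 : (((2*m+1 : Nat) : Int) - ((m:Int) + 1 - 1)).toNat = m + 1 := by
          push_cast; omega
        rw [h2]
      have hA1 : (List.foldl (pvStepA ((m:Int)+1)) ([], 3 + (((2*m+1 : Nat) : Int) - 3) * 2, 0)
          ((List.range (m+1)).map (fun k : Nat => ((2*m+1 : Nat) : Int) - (k : Int)))).1
          = pvRowsTop m := by
        rw [List.range_succ, List.map_append, List.foldl_append,
          pvLoop1a ((m:Int)+1) _ m (fun k hk => by push_cast; omega)]
        simp only [List.map_cons, List.map_nil, List.foldl_cons, List.foldl_nil]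
        rw [pvStepA, if_pos (by push_cast; omega)]
        simp only [pvRowsTop, List.nil_append]
        refine congrArg₂ (· ++ ·) ?_ ?_
        · refine List.map_congr_left ?_
          intro j hj
          have hj' : j < m := List.mem_range.1 hj
          rw [pvSp_congr (show (0:Int) + 2*(j:Int) = 2*(j:Int) by ring),
            pvSp_congr (show 3 + (((2*m+1 : Nat) : Int) - 3) * 2 - 4*(j:Int)
              = 4*(m:Int) - 1 - 4*(j:Int) by push_cast; ring)]
        · rw [pvSp_congr (show (0:Int) + 2*(m:Int) = 2*(m:Int) by ring)]
      -- A's mirror loop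
      have hr2 : PySem.List.pyRange ((m:Int) + 1 - 2) (-1) (-1)
          = (List.range m).map (fun k : Nat => ((m:Int) - 1) - (k : Int)) := by
        rw [show ((m:Int) + 1 - 2) = (m:Int) - 1 by ring,
          pvRange_neg_one _ _ (by omega)]
        have h2 : (((m:Int) - 1) - (-1)).toNat = m := by omega
        rw [h2]
      have hA2 := pvLoop2a ((m:Int) - 1) (pvRowsTop m) m
        (fun k hk => by rw [pvRowsTop_length]; omega)
        (pvRowsTop m) (List.prefix_refl _)
      -- B's rows
      have hB : (PySem.List.pyRange 0 ((2*m+1 : Nat) : Int) 1).map (pvRowB ((2*m+1 : Nat) : Int))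
          = pvRowsTop m ++ (List.range m).map
              (fun k : Nat => (pvRowsTop m).getD (((m:Int) - 1) - (k : Int)).toNat []) := by
        have hsplit : List.range (2*m+1) = List.range (m+1) ++ (List.range m).map ((m+1) + ·) := by
          rw [show 2*m+1 = (m+1) + m by omega, List.range_add]
        rw [PySem.List.pyRange_zero_natCast, List.map_map, hsplit, List.map_append]
        refine congrArg₂ (· ++ ·) ?_ ?_
        · rw [List.range_succ, List.map_append]
          simp only [Function.comp, List.map_cons, List.map_nil]
          rw [pvRowsTop]
          refine congrArg₂ (· ++ ·) ?_ ?_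
          · refine List.map_congr_left ?_
            intro i hi
            have hi' : i < m := List.mem_range.1 hi
            simp only [Function.comp_apply]
            rw [pvRowB_top m i (le_of_lt hi'), if_neg (Nat.ne_of_lt hi')]
          · rw [pvRowB_top m m le_rfl, if_pos rfl]
        · rw [List.map_map]
          refine List.map_congr_left ?_
          intro k hk
          have hk' : k < m := List.mem_range.1 hk
          simp only [Function.comp_apply]
          rw [pvRowB_bot m k hk',
            pvRowsTop_getD m (((m:Int) - 1) - (k : Int)).toNat (by omega),
            pvSp_congr (show 2*(((((m:Int) - 1) - (k : Int)).toNat : Nat) : Int)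
              = 2*((m-1-k : Nat) : Int) by omega),
            pvSp_congr (show 4*(m:Int) - 1 - 4*(((((m:Int) - 1) - (k : Int)).toNat : Nat) : Int)
              = 4*(m:Int) - 1 - 4*((m-1-k : Nat) : Int) by omega)]
      simp only [hr1, hr2, hA1, hA2, hB]
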